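-- pv_equiv track=rewrite | github.com/picaindahouse/Code-Wars-Projects | Just Practice- 40 to 99/Side Project 69 (6 Kyu) (Squared III)/Side Project 69.py | diag_1_sym
-- ===== SOURCE A (Python) =====
-- def diag_1_sym(s):
--     t = []
--     for x in s.split():
--         for i,y in enumerate(x):
--             if len(t) < i + 1:
--                 t.append(y)
--             else:
--                 t[i] = t[i] + y
--     return '\n'.join(t)
-- ===== SOURCE B (Python) =====
-- def diag_1_sym(s):
--     rows = s.split()
--     cols = []
--     i = 0
--     while any(len(r) > i for r in rows):
--         cols.append(''.join(r[i] for r in rows if len(r) > i))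
--         i += 1
--     return '\n'.join(cols)
-- ===== Notes on version B (the rewrite author's own statement) =====
-- stated objective: alternative
-- what changed: A accumulates row-by-row into an indexed list of growing strings with a per-character length guard; B transposes column-by-column: for each column index i it joins the i-th character of every word long enough, while any word still has a character at i.
import Mathlib
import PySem

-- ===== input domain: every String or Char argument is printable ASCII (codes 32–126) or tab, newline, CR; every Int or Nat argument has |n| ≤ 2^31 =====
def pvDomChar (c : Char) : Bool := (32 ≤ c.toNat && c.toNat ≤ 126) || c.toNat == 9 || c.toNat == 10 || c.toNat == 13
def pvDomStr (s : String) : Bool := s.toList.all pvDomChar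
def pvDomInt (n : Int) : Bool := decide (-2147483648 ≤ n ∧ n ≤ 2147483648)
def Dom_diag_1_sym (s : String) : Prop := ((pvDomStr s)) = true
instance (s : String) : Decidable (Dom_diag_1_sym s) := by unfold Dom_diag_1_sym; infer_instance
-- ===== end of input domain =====

-- B replaces A's indexed row-by-row accumulation by a column-wise transpose (peel first chars, drop them, repeat); alternative decomposition, same result.

-- ===== PORT A =====
-- one step of A's inner loop: if len(t) < i+1: t.append(y) else: t[i] = t[i] + y
-- (Python str is represented as List Char via PySem.Chars; the read t[i] is always in range here, ported as getD)
def pvStepA (t : List (List Char)) (p : Int × Char) : List (List Char) :=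
  if (t.length : Int) < p.1 + 1 then t ++ [[p.2]]
  else t.set p.1.toNat (t.getD p.1.toNat [] ++ [p.2])

def diag_1_sym (s : String) : String :=
  let t := ((PySem.Str.split₀ s).map String.toList).foldl
    (fun t x => (PySem.List.enumerate x).foldl pvStepA t) []
  String.ofList (PySem.Chars.join ['\n'] t)

-- ===== PORT B =====
def pvMaxLen (rows : List (List Char)) : Nat := (rows.map List.length).foldr max 0

-- used by pvColsB's decreasing_by
theorem pv_le_maxLen (rows : List (List Char)) (r : List Char) (hr : r ∈ rows) :
    r.length ≤ pvMaxLen rows := by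
  induction rows with
  | nil => cases hr
  | cons a l ih =>
    rcases List.mem_cons.mp hr with rfl | h
    · exact le_max_left _ _
    · exact le_trans (ih h) (le_max_right _ _)

-- while any(len(r) > i for r in rows): cols.append(''.join(r[i] for r in rows if len(r) > i)); i += 1
def pvColsB (rows : List (List Char)) (i : Nat) : List (List Char) :=
  if rows.any (fun r => decide (i < r.length)) then
    rows.filterMap (fun r => r[i]?) :: pvColsB rows (i + 1)
  else []
termination_by pvMaxLen rows - i
decreasing_by
  rename_i h
  simp only [List.any_eq_true, decide_eq_true_eq] at h
  obtain ⟨r, hr, hi⟩ := h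
  have := pv_le_maxLen rows r hr
  omega

def diag_1_sym_alt (s : String) : String :=
  String.ofList (PySem.Chars.join ['\n'] (pvColsB ((PySem.Str.split₀ s).map String.toList) 0))

-- ===== PRECONDITION & SPEC =====
def Spec_diag_1_sym (s : String) (out : String) : Prop := out = diag_1_sym_alt s
instance (s : String) (out : String) : Decidable (Spec_diag_1_sym s out) := by unfold Spec_diag_1_sym; infer_instance

-- ===== CLAIM (what is proved, stated in full; the proofs are below) =====
def Claim_equal_diag_1_sym : Prop := ∀ (s : String), Dom_diag_1_sym s → Spec_diag_1_sym s (diag_1_sym s)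

-- ===== LEMMAS AND PROOFS =====

-- drop-based form of B's column peeling, used as a stepping stone
theorem pv_sum_drop_lt (rows : List (List Char)) (h : rows.any (fun r => !r.isEmpty) = true) :
    ((rows.map (List.drop 1)).map List.length).sum < (rows.map List.length).sum := by
  simp only [List.any_eq_true] at h
  obtain ⟨r, hr, hne⟩ := h
  have h0 : r.length ≠ 0 := by simpa using hne
  rw [List.map_map]
  exact List.sum_lt_sum _ _ (fun i _ => by simp)
    ⟨r, hr, by simp only [Function.comp_apply, List.length_drop]; omega⟩

def pvColsAux (rows : List (List Char)) : List (List Char) :=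
  if rows.any (fun r => !r.isEmpty) then
    rows.filterMap List.head? :: pvColsAux (rows.map (List.drop 1))
  else []
termination_by (rows.map List.length).sum
decreasing_by
  rename_i h
  simpa [Function.comp_def] using pv_sum_drop_lt rows h


-- unfolding lemma for pvColsAux (its compiled equations go through List.attach)
theorem pvColsAux_eq (rows : List (List Char)) : pvColsAux rows =
    if rows.any (fun r => !r.isEmpty) then
      rows.filterMap List.head? :: pvColsAux (rows.map (List.drop 1))
    else [] := by
  rw [pvColsAux]

-- structural form of what A's inner loop does to t: extend row j by w[j], open new rows past the end
def pvZipExt : List (List Char) → List Char → List (List Char)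
  | t, [] => t
  | [], y :: w => [y] :: pvZipExt [] w
  | r :: t, y :: w => (r ++ [y]) :: pvZipExt t w

theorem pvZipExt_nil (t : List (List Char)) : pvZipExt t [] = t := by
  cases t <;> rfl

theorem innerA_go (w : List Char) (p t : List (List Char)) :
    (PySem.List.enumerate w (p.length : Int)).foldl pvStepA (p ++ t) = p ++ pvZipExt t w := by
  induction w generalizing p t with
  | nil => simp [PySem.List.enumerate, pvZipExt_nil]
  | cons y w ih =>
    rw [PySem.List.enumerate_cons, List.foldl_cons]
    cases t with
    | nil =>
      have hstep : pvStepA (p ++ []) ((p.length : Int), y) = (p ++ [[y]]) ++ [] := by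
        simp [pvStepA]
      rw [hstep]
      have hlen : ((p.length : Int) + 1) = (((p ++ [[y]]).length : Nat) : Int) := by
        simp
      rw [hlen, ih (p ++ [[y]]) []]
      simp [pvZipExt]
    | cons r t =>
      have hstep : pvStepA (p ++ r :: t) ((p.length : Int), y) = (p ++ [r ++ [y]]) ++ t := by
        have hlt : ¬ (((p ++ r :: t).length : Int) < (p.length : Int) + 1) := by
          simp
        have hget : (p ++ r :: t).getD p.length [] = r := by
          rw [List.getD_eq_getElem?_getD, List.getElem?_append_right (le_refl _)]
          simp
        simp only [pvStepA, if_neg hlt, Int.toNat_natCast, hget]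
        rw [List.set_append_right _ _ (le_refl _)]
        simp
      rw [hstep]
      have hlen : ((p.length : Int) + 1) = (((p ++ [r ++ [y]]).length : Nat) : Int) := by
        simp
      rw [hlen, ih (p ++ [r ++ [y]]) t]
      simp [pvZipExt]

theorem innerA_eq (w : List Char) (t : List (List Char)) :
    (PySem.List.enumerate w 0).foldl pvStepA t = pvZipExt t w := by
  simpa using innerA_go w [] t

theorem cols_append_nil (rows : List (List Char)) :
    pvColsAux (rows ++ [[]]) = pvColsAux rows := by
  generalize hn : (rows.map List.length).sum = n
  induction n using Nat.strong_induction_on generalizing rows with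
  | _ n ih =>
    have hany : (rows ++ [[]]).any (fun r => !r.isEmpty) = rows.any (fun r => !r.isEmpty) := by
      simp
    cases hc : rows.any (fun r => !r.isEmpty) with
    | false =>
      rw [pvColsAux_eq (rows ++ [[]]), if_neg (by rw [hany, hc]; simp),
          pvColsAux_eq rows, if_neg (by rw [hc]; simp)]
    | true =>
      rw [pvColsAux_eq (rows ++ [[]]), if_pos (by rw [hany, hc]),
          pvColsAux_eq rows, if_pos hc]
      congr 1
      · simp [List.filterMap_append]
      · have hmap : (rows ++ [[]]).map (List.drop 1) = rows.map (List.drop 1) ++ [[]] := by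
          simp
        rw [hmap]
        exact ih _ (hn ▸ pv_sum_drop_lt rows hc) _ rfl

theorem zipExt_cols (w : List Char) (rows : List (List Char)) :
    pvZipExt (pvColsAux rows) w = pvColsAux (rows ++ [w]) := by
  induction w generalizing rows with
  | nil => rw [pvZipExt_nil, cols_append_nil]
  | cons y w ih =>
    have hpos : (rows ++ [y :: w]).any (fun r => !r.isEmpty) = true := by simp
    have hmap : (rows ++ [y :: w]).map (List.drop 1) = rows.map (List.drop 1) ++ [w] := by
      simp
    by_cases hall : rows.any (fun r => !r.isEmpty) = true
    · rw [pvColsAux_eq rows, if_pos hall, pvColsAux_eq (rows ++ [y :: w]), if_pos hpos,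
          hmap, ← ih (rows.map (List.drop 1))]
      show pvZipExt (_ :: _) (y :: w) = _
      rw [pvZipExt]
      congr 1
      simp [List.filterMap_append]
    · have hempty : ∀ r ∈ rows, r = [] := by
        intro r hr
        by_contra hne
        exact hall (by simp only [List.any_eq_true]; exact ⟨r, hr, by simpa using hne⟩)
      have hnil : pvColsAux rows = [] := by
        rw [pvColsAux_eq, if_neg hall]
      have hnil' : pvColsAux (rows.map (List.drop 1)) = [] := by
        rw [pvColsAux_eq, if_neg]
        simp only [List.any_eq_true, not_exists, List.mem_map]
        rintro x ⟨⟨r, hr, rfl⟩, hx⟩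
        rw [hempty r hr] at hx
        simp at hx
      rw [hnil, pvColsAux_eq (rows ++ [y :: w]), if_pos hpos, hmap,
          ← ih (rows.map (List.drop 1)), hnil']
      show pvZipExt [] (y :: w) = _
      rw [pvZipExt]
      congr 1
      rw [List.filterMap_append]
      have : rows.filterMap List.head? = [] := by
        rw [List.filterMap_eq_nil_iff]
        intro r hr
        rw [hempty r hr]
        rfl
      rw [this]
      rfl

theorem pvColsB_eq (rows : List (List Char)) (i : Nat) : pvColsB rows i =
    if rows.any (fun r => decide (i < r.length)) then
      rows.filterMap (fun r => r[i]?) :: pvColsB rows (i + 1)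
    else [] := by
  rw [pvColsB]


theorem colsB_eq_aux (rows : List (List Char)) (i : Nat) :
    pvColsB rows i = pvColsAux (rows.map (List.drop i)) := by
  generalize hn : pvMaxLen rows - i = n
  induction n generalizing i with
  | zero =>
    rw [pvColsB_eq, pvColsAux_eq, if_neg, if_neg]
    · simp only [List.any_eq_true, List.mem_map, not_exists]
      rintro x ⟨⟨r, hr, rfl⟩, hx⟩
      have := pv_le_maxLen rows r hr
      simp only [Bool.not_eq_true', List.isEmpty_eq_false_iff, ne_eq, ← List.length_pos_iff,
        List.length_drop] at hx
      omega
    · simp only [List.any_eq_true, decide_eq_true_eq, not_exists]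
      rintro r ⟨hr, hi⟩
      have := pv_le_maxLen rows r hr
      omega
  | succ n ih =>
    by_cases hc : rows.any (fun r => decide (i < r.length)) = true
    · rw [pvColsB_eq, if_pos hc, pvColsAux_eq, if_pos]
      · congr 1
        · rw [List.filterMap_map]
          congr 1
          funext r
          simp [List.head?_drop]
        · rw [ih (i + 1) (by omega), List.map_map]
          congr 1
          exact List.map_congr_left (fun r _ => by
            simp only [Function.comp_apply, List.drop_drop])
      · simp only [List.any_eq_true, decide_eq_true_eq] at hc
        obtain ⟨r, hr, hi⟩ := hc
        simp only [List.any_eq_true, List.mem_map]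
        exact ⟨r.drop i, ⟨r, hr, rfl⟩, by simp; omega⟩
    · rw [pvColsB_eq, if_neg hc, pvColsAux_eq, if_neg]
      simp only [List.any_eq_true, decide_eq_true_eq, not_exists] at hc
      simp only [List.any_eq_true, List.mem_map, not_exists]
      rintro x ⟨⟨r, hr, rfl⟩, hx⟩
      simp only [Bool.not_eq_true', List.isEmpty_eq_false_iff, ne_eq, ← List.length_pos_iff,
        List.length_drop] at hx
      exact hc r ⟨hr, by omega⟩

theorem fold_eq_cols (ws : List (List Char)) :
    ws.foldl (fun t x => (PySem.List.enumerate x).foldl pvStepA t) [] = pvColsAux ws := by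
  induction ws using List.reverseRecOn with
  | nil => rw [pvColsAux_eq]; simp
  | append_singleton ws w ih =>
    rw [List.foldl_append, List.foldl_cons, List.foldl_nil, ih, innerA_eq, zipExt_cols]

-- ===== VERDICT (by name: the statement is the Claim_ definition above) =====
theorem diag_1_sym_spec : Claim_equal_diag_1_sym := by
  intro s _
  unfold Spec_diag_1_sym diag_1_sym diag_1_sym_alt
  rw [fold_eq_cols, colsB_eq_aux]
  have hdrop0 : ∀ (l : List (List Char)), List.map (List.drop 0) l = l := by
    intro l
    induction l with
    | nil => rfl
    | cons a t ih => simp only [List.map_cons, List.drop_zero, ih]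
  rw [hdrop0]
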